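-- pv_equiv track=rewrite | github.com/mark201200/Uni | Fondamenti/tools/tools.py | first_left
-- ===== SOURCE A (Python) =====
-- def first_left(phrase, left_parts):
--     """Return the list of indices of the first left parts in a phrase."""
--     matching_lefts = []
--     for left_part in left_parts:
--         for i in range(len(phrase)-len(left_part)+1):
--             for j in range(len(left_part)):
--                 if phrase[i+j] != left_part[j]:
--                     break
--             else:
--                 matching_lefts.append((i, left_part))
--     min_index = min([x[0] for x in matching_lefts])
--     return [x for x in matching_lefts if x[0] == min_index]
-- ===== SOURCE B (Python) =====
-- def first_left(phrase, left_parts):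
--     """Return the list of indices of the first left parts in a phrase."""
--     for i in range(len(phrase) + 1):
--         hits = [(i, part) for part in left_parts if phrase[i:i+len(part)] == part]
--         if hits:
--             return hits
--     return []
-- ===== Notes on version B (the rewrite author's own statement) =====
-- stated objective: faster
-- what changed: B swaps the loop nesting: it scans positions left to right and returns the per-position match list at the first position where any left_part matches, never building the full match list nor running A's separate min/filter passes; Pre_ excludes the no-match inputs, where A's min([]) raises ValueError.
import Mathlib
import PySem

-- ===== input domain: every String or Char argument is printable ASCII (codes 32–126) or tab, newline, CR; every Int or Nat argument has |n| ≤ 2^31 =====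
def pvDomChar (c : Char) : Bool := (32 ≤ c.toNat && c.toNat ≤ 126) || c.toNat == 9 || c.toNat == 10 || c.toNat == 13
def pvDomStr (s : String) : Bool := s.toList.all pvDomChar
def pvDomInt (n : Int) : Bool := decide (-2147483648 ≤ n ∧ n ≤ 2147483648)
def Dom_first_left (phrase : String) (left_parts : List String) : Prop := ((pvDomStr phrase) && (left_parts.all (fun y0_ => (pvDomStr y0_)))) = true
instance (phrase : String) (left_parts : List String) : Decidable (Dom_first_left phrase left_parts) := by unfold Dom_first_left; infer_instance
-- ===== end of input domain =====

-- B scans positions left to right and returns at the first position with a match,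
-- avoiding A's full match list and its separate min/filter passes (faster: early exit).


-- ===== PORT A =====
-- inner 'for j in range(len(left_part)): if phrase[i+j] != left_part[j]: break / else:' — the for-else
-- succeeds exactly when every j compares equal (.all short-circuits like the break)
def flA_inner (ph lp : List Char) (i : Int) : Bool :=
  (PySem.List.pyRange 0 (lp.length : Int) 1).all (fun j =>
    PySem.List.pyGetD ph (i + j) ' ' == PySem.List.pyGetD lp j ' ')

def first_left (phrase : String) (left_parts : List String) : List (Int × String) :=
  let ph := phrase.toList
  let matching_lefts := left_parts.foldl (fun acc lp =>
    (PySem.List.pyRange 0 ((ph.length : Int) - (lp.toList.length : Int) + 1) 1).foldl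
      (fun acc2 i => if flA_inner ph lp.toList i then acc2 ++ [(i, lp)] else acc2) acc) []
  match PySem.List.min? (matching_lefts.map (fun x => x.1)) (fun x => x) with
  | none => []            -- min([]) raises ValueError in Python: excluded by Pre_first_left
  | some m => matching_lefts.filter (fun x => x.1 == m)

-- ===== PORT B =====
-- hits = [(i, part) for part in left_parts if phrase[i:i+len(part)] == part]
def flB_hits (ph : List Char) (parts : List String) (i : Nat) : List (Int × String) :=
  parts.filterMap (fun p =>
    if PySem.List.slice ph (some (i : Int)) (some ((i : Int) + (p.toList.length : Int))) = p.toList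
    then some ((i : Int), p) else none)

-- for i in range(len(phrase) + 1): … return hits at the first i where hits is non-empty; else []
def flB_go (ph : List Char) (parts : List String) : Nat → Nat → List (Int × String)
  | _, 0 => []
  | i, fuel+1 =>
    let hits := flB_hits ph parts i
    if hits.isEmpty then flB_go ph parts (i+1) fuel else hits

def first_left_alt (phrase : String) (left_parts : List String) : List (Int × String) :=
  flB_go phrase.toList left_parts 0 (phrase.toList.length + 1)

-- ===== PRECONDITION & SPEC =====
-- Pre_ excludes exactly the inputs where no left_part occurs in the phrase: there A's min([])
-- raises ValueError (B returns []).
def Pre_first_left (phrase : String) (left_parts : List String) : Prop :=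
  ∃ p ∈ left_parts, PySem.Str.isIn p phrase = true
instance (phrase : String) (left_parts : List String) : Decidable (Pre_first_left phrase left_parts) := by unfold Pre_first_left; infer_instance

def pvWitness_first_left : String × List String := ("abc", ["b", "zz"])

def Spec_first_left (phrase : String) (left_parts : List String) (out : List (Int × String)) : Prop := out = first_left_alt phrase left_parts
instance (phrase : String) (left_parts : List String) (out : List (Int × String)) : Decidable (Spec_first_left phrase left_parts out) := by unfold Spec_first_left; infer_instance

-- ===== CLAIM (what is proved, stated in full; the proofs are below) =====
def Claim_equal_first_left : Prop := ∀ (phrase : String) (left_parts : List String), Dom_first_left phrase left_parts → Pre_first_left phrase left_parts → Spec_first_left phrase left_parts (first_left phrase left_parts)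

-- ===== LEMMAS AND PROOFS =====

-- 'phrase[i:i+len(p)] == p' as a Bool, the common match test of both sides
def okB (ph : List Char) (i : Nat) (p : List Char) : Bool := (ph.drop i).take p.length == p

def goodAt (ph : List Char) (ps : List String) (i : Nat) : Prop := ∃ p ∈ ps, okB ph i p.toList = true

def hitsAt (ph : List Char) (ps : List String) (m : Nat) : List (Int × String) :=
  ps.filterMap (fun p => if okB ph m p.toList then some ((m : Int), p) else none)

-- A's per-part inner list, in closed form
def Ap (ph : List Char) (lp : String) : List (Int × String) :=
  ((List.range (ph.length + 1 - lp.toList.length)).filter (fun i => okB ph i lp.toList)).map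
    (fun i : Nat => ((i : Int), lp))

theorem hits_eq (ph : List Char) (ps : List String) (i : Nat) :
    flB_hits ph ps i = hitsAt ph ps i := by
  unfold flB_hits hitsAt
  congr 1; funext p
  rw [PySem.List.slice_natCast_add]
  simp [okB]

theorem okB_bound {ph p : List Char} {i : Nat} (h : okB ph i p = true) (hne : p ≠ []) :
    i + p.length ≤ ph.length := by
  rw [okB, beq_iff_eq] at h
  have hl := congrArg List.length h
  simp [List.length_take, List.length_drop] at hl
  have hp : 0 < p.length := List.length_pos_of_ne_nil hne
  omega

theorem innerEq (ph lp : List Char) (k : Nat) (hk : k + lp.length ≤ ph.length) :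
    flA_inner ph lp (k : Int) = okB ph k lp := by
  have hlen : ((ph.drop k).take lp.length).length = lp.length := by
    simp [List.length_take, List.length_drop]; omega
  rw [Bool.eq_iff_iff]
  simp only [flA_inner, okB, PySem.List.pyRange_one, List.all_map, List.all_eq_true,
    List.mem_range, beq_iff_eq, Function.comp_apply, zero_add, Int.sub_zero, Int.toNat_natCast]
  constructor
  · intro h
    apply List.ext_getElem (by simpa using hlen)
    intro j hj1 hj2
    have hj : j < lp.length := hj2
    have := h j (by simpa using hj)
    rw [← Int.natCast_add] at this
    rw [PySem.List.pyGetD_natCast, PySem.List.pyGetD_natCast] at this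
    rw [List.getElem_take, List.getElem_drop]
    rw [List.getD_eq_getElem _ _ (by omega), List.getD_eq_getElem _ _ hj] at this
    exact this
  · intro h j hj
    have hj' : j < lp.length := by simpa using hj
    rw [← Int.natCast_add, PySem.List.pyGetD_natCast, PySem.List.pyGetD_natCast]
    rw [List.getD_eq_getElem _ _ (by omega), List.getD_eq_getElem _ _ hj']
    have := congrArg (fun l => l.getD j ' ') h
    simp only [] at this
    rw [List.getD_eq_getElem _ _ (by omega), List.getD_eq_getElem _ _ hj'] at this
    rw [List.getElem_take, List.getElem_drop] at this
    exact this

theorem Apart_eq (ph : List Char) (lp : String) (acc : List (Int × String)) :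
    (PySem.List.pyRange 0 ((ph.length : Int) - (lp.toList.length : Int) + 1) 1).foldl
      (fun acc2 i => if flA_inner ph lp.toList i then acc2 ++ [(i, lp)] else acc2) acc
    = acc ++ Ap ph lp := by
  rw [PySem.List.pyRange_one, List.foldl_map]
  have hN : (((ph.length : Int) - (lp.toList.length : Int) + 1) - 0).toNat
      = ph.length + 1 - lp.toList.length := by omega
  rw [hN]
  have hcg : ∀ (a : List (Int × String)) (k : Nat), k ∈ List.range (ph.length + 1 - lp.toList.length) →
      (if flA_inner ph lp.toList ((0 : Int) + (k : Int)) then a ++ [(((0 : Int) + (k : Int)), lp)] else a)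
      = (if okB ph k lp.toList then a ++ [(((k : Nat) : Int), lp)] else a) := by
    intro a k hk
    have hk' : k < ph.length + 1 - lp.toList.length := List.mem_range.mp hk
    have hb : k + lp.toList.length ≤ ph.length := by omega
    rw [zero_add, innerEq ph lp.toList k hb]
  refine Eq.trans
    (PySem.List.foldl_congr_mem
      (List.range (ph.length + 1 - lp.toList.length))
      (fun acc2 k => if flA_inner ph lp.toList ((0 : Int) + (k : Int)) then acc2 ++ [(((0 : Int) + (k : Int)), lp)] else acc2)
      (fun a k => if okB ph k lp.toList then a ++ [(((k : Nat) : Int), lp)] else a)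
      acc hcg) ?_
  unfold Ap
  exact PySem.List.foldl_append_if (fun i => okB ph i lp.toList) (fun i => (((i : Nat) : Int), lp)) _ _

theorem filter_range_single (N m : Nat) (q : Nat → Bool) :
    ((List.range N).filter (fun i => (i == m) && q i)) = if m < N ∧ q m = true then [m] else [] := by
  induction N with
  | zero => simp
  | succ N ih =>
    rw [List.range_succ, List.filter_append, ih]
    by_cases hq : q m = true
    · by_cases hm : m < N
      · have hne : ¬ (N == m) = true := by simp; omega
        simp [hm, hq, Nat.lt_succ_of_lt hm, hne]
      · by_cases he : N = m
        · subst he; simp [hq]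
        · have h2 : ¬ m < N + 1 := by omega
          simp [hm, hq, he, h2]
    · by_cases he : N = m
      · subst he; simp [hq]
      · simp [hq, he]

theorem flatMap_if_eq_filterMap {α β : Type} (ps : List α) (c : α → Bool) (g : α → β) :
    ps.flatMap (fun p => if c p then [g p] else []) = ps.filterMap (fun p => if c p then some (g p) else none) := by
  induction ps with
  | nil => rfl
  | cons p t ih => by_cases h : c p <;> simp [h, ih]

theorem flB_go_eq (ph : List Char) (ps : List String) (m : Nat)
    (hmin : ∀ j < m, ¬ goodAt ph ps j) (hg : goodAt ph ps m) :
    ∀ fuel i, i ≤ m → m < i + fuel → flB_go ph ps i fuel = hitsAt ph ps m := by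
  intro fuel
  induction fuel with
  | zero => intro i h1 h2; omega
  | succ fuel ih =>
    intro i h1 h2
    show (let hits := flB_hits ph ps i; if hits.isEmpty then flB_go ph ps (i+1) fuel else hits)
      = hitsAt ph ps m
    rw [hits_eq]
    by_cases hi : i = m
    · subst hi
      obtain ⟨p, hp, hok⟩ := hg
      have hne : hitsAt ph ps i ≠ [] := by
        simp only [hitsAt, ne_eq, List.filterMap_eq_nil_iff, not_forall]
        exact ⟨p, hp, by simp [hok]⟩
      simp [List.isEmpty_iff, hne]
    · have hlt : i < m := by omega
      have hempty : hitsAt ph ps i = [] := by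
        rw [hitsAt, List.filterMap_eq_nil_iff]
        intro p hp
        by_cases hok : okB ph i p.toList = true
        · exact absurd ⟨p, hp, hok⟩ (hmin i hlt)
        · simp [hok]
      simp only [hempty, List.isEmpty_nil, if_true]
      exact ih (i+1) (by omega) (by omega)

theorem matching_eq (ph : List Char) (parts : List String) :
    parts.foldl (fun acc lp =>
      (PySem.List.pyRange 0 ((ph.length : Int) - (lp.toList.length : Int) + 1) 1).foldl
        (fun acc2 i => if flA_inner ph lp.toList i then acc2 ++ [(i, lp)] else acc2) acc) []
    = parts.flatMap (Ap ph) := by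
  have hfun : (fun (acc : List (Int × String)) lp =>
      (PySem.List.pyRange 0 ((ph.length : Int) - (lp.toList.length : Int) + 1) 1).foldl
        (fun acc2 i => if flA_inner ph lp.toList i then acc2 ++ [(i, lp)] else acc2) acc)
      = fun acc lp => acc ++ Ap ph lp := by
    funext acc lp; exact Apart_eq ph lp acc
  rw [hfun]
  simpa using PySem.List.foldl_append_eq_flatMap (Ap ph) parts ([] : List (Int × String))

-- ===== VERDICT (by name: the statement is the Claim_ definition above) =====
theorem first_left_spec : Claim_equal_first_left := by
  intro phrase parts _ hpre
  unfold Spec_first_left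
  classical
  have hE : ∃ i, goodAt phrase.toList parts i := by
    obtain ⟨p, hp, hin⟩ := hpre
    have hin' : PySem.Chars.isIn p.toList phrase.toList = true := by
      simpa [PySem.Str.isIn] using hin
    obtain ⟨j, hj⟩ := (PySem.Chars.exists_prefix_drop_iff_isIn p.toList phrase.toList).mpr hin'
    exact ⟨j, p, hp, by
      rw [okB, beq_iff_eq]
      exact ((List.prefix_iff_eq_take).mp hj).symm⟩
  set ph := phrase.toList with hph
  set m := Nat.find hE with hmdef
  have hg : goodAt ph parts m := Nat.find_spec hE
  have hmin : ∀ j < m, ¬ goodAt ph parts j := fun j hj => Nat.find_min hE hj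
  obtain ⟨p0, hp0, hok0⟩ := hg
  have hmn : m ≤ ph.length := by
    by_cases h0 : p0.toList = []
    · have hg0 : goodAt ph parts 0 := ⟨p0, hp0, by simp [okB, h0]⟩
      have := Nat.find_min' hE hg0
      omega
    · have := okB_bound hok0 h0
      omega
  have hB : first_left_alt phrase parts = hitsAt ph parts m := by
    unfold first_left_alt
    exact flB_go_eq ph parts m hmin ⟨p0, hp0, hok0⟩ (ph.length + 1) 0 (by omega) (by omega)
  rw [hB]
  -- A side
  have hmem : ∀ x ∈ parts.flatMap (Ap ph), ∃ i : Nat, x.1 = (i : Int) ∧ goodAt ph parts i := by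
    intro x hx
    simp only [List.mem_flatMap, Ap, List.mem_map, List.mem_filter, List.mem_range] at hx
    obtain ⟨p, hp, i, ⟨hiN, hok⟩, rfl⟩ := hx
    exact ⟨i, rfl, p, hp, hok⟩
  have hmmem : ((m : Int), p0) ∈ parts.flatMap (Ap ph) := by
    simp only [List.mem_flatMap, Ap, List.mem_map, List.mem_filter, List.mem_range]
    refine ⟨p0, hp0, m, ⟨?_, hok0⟩, rfl⟩
    by_cases h0 : p0.toList = []
    · simp [h0]; omega
    · have := okB_bound hok0 h0; omega
  have hmin? : PySem.List.min? ((parts.flatMap (Ap ph)).map (fun x => x.1)) (fun x => x)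
      = some (m : Int) := by
    cases h : PySem.List.min? ((parts.flatMap (Ap ph)).map (fun x => x.1)) (fun x => x) with
    | none =>
      rw [PySem.List.min?_eq_none_iff, List.map_eq_nil_iff] at h
      rw [h] at hmmem; simp at hmmem
    | some v =>
      have hvmem := PySem.List.min?_mem h
      have hvmin := PySem.List.min?_isMin h
      have h1 : v ≤ (m : Int) := hvmin _ (List.mem_map.mpr ⟨_, hmmem, rfl⟩)
      obtain ⟨x, hx, hxv⟩ := List.mem_map.mp hvmem
      obtain ⟨i, hxi, hgood⟩ := hmem x hx
      have h2 : m ≤ i := Nat.find_min' hE hgood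
      have h3 : v = (i : Int) := by rw [← hxv, hxi]
      exact congrArg some (by omega)
  have hfilt : (parts.flatMap (Ap ph)).filter (fun x => x.1 == (m : Int)) = hitsAt ph parts m := by
    rw [List.filter_flatMap, hitsAt, ← flatMap_if_eq_filterMap]
    congr 1
    funext p
    rw [Ap, List.filter_map, List.filter_filter]
    have hpred : (fun i => ((fun x : Int × String => x.1 == (m : Int)) ∘ (fun i : Nat => ((i : Int), p))) i && okB ph i p.toList)
        = fun i => (i == m) && okB ph i p.toList := by
      funext i; simp [Function.comp, beq_eq_decide, Nat.cast_inj]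
    rw [hpred, filter_range_single]
    by_cases hok : okB ph m p.toList = true
    · have hmN : m < ph.length + 1 - p.toList.length := by
        by_cases h0 : p.toList = []
        · simp [h0]; omega
        · have := okB_bound hok h0; omega
      rw [if_pos ⟨hmN, hok⟩, if_pos hok]; rfl
    · rw [if_neg (fun h => hok h.2), if_neg hok]; rfl
  show first_left phrase parts = hitsAt ph parts m
  unfold first_left
  simp only [← hph, matching_eq, hmin?]
  exact hfilt
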